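-- pv_equiv track=rewrite | github.com/the-timoye/algorithms | binary_gap.py | count_gaps
-- ===== SOURCE A (Python) =====
-- def count_gaps(binary_string):
--   """
--     @description:
--      counts gaps in binary string
--     @params:
--       binary_string (STR)
--     @returns:
--       highest_count (INT): the length of the largest sequence of zeros in between ones
--   """
--   counter = 0
--   index = 0
--   highest_count = counter
--   while index <  len(binary_string):
--     if binary_string[index] == '0':
--       counter += 1
--     else:
--       if highest_count < counter:
--         highest_count = counter
--       counter = 0
--     index+=1
--   return highest_count
-- ===== SOURCE B (Python) =====
-- import re
--
-- def count_gaps(binary_string):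
--     parts = re.split(r'[^0]', binary_string)
--     return max(map(len, parts[:-1]), default=0)
-- ===== Notes on version B (the rewrite author's own statement) =====
-- stated objective: idiomatic
-- what changed: Replaces the stateful counter/highest while-loop with a declarative pipeline: regex-split the string on any non-'0' character into zero-runs, drop the trailing run, and take the max of the run lengths (default 0).
import Mathlib
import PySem

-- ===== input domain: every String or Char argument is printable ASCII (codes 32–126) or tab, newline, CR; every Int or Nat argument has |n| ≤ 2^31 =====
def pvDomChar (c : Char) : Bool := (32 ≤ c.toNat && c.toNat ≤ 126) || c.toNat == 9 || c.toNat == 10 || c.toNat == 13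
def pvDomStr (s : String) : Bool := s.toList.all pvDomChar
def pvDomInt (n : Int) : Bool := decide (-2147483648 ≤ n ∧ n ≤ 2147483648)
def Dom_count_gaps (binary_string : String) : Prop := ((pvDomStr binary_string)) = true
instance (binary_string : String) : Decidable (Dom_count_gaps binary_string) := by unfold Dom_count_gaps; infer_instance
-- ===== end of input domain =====

-- B replaces A's stateful counter loop with a declarative split-into-zero-runs / max-of-lengths pipeline (idiomatic; same value).

-- ===== PORT A =====
-- A's while-loop over indices 0..len-1, carried state (counter, highest_count); ported as
-- structural recursion over the character list (same traversal, same state, same branches).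
def countGapsLoop : List Char → Int → Int → Int
  | [], _, highest_count => highest_count
  | c :: rest, counter, highest_count =>
    if c = '0' then
      countGapsLoop rest (counter + 1) highest_count
    else
      countGapsLoop rest 0 (if highest_count < counter then counter else highest_count)

def count_gaps (binary_string : String) : Int :=
  countGapsLoop binary_string.toList 0 0

-- ===== PORT B =====
-- hand port of re.split(r'[^0]', s): split the character list at every non-'0' character,
-- yielding the maximal runs of '0's (exact: each char is either a one-char delimiter or a '0').
def splitNonZero : List Char → List (List Char)
  | [] => [[]]
  | c :: rest =>
    if c = '0' then
      match splitNonZero rest with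
      | p :: ps => (c :: p) :: ps
      | [] => [[c]]
    else
      [] :: splitNonZero rest

-- max(map(len, parts[:-1]), default=0): fold max over the lengths, starting from the default 0
-- (exact here: all lengths are ≥ 0, so the fold equals Python's max-with-default).
def count_gaps_alt (binary_string : String) : Int :=
  let parts := splitNonZero binary_string.toList
  (parts.dropLast.map (fun p => (p.length : Int))).foldl max 0

-- ===== PRECONDITION & SPEC =====
def Spec_count_gaps (binary_string : String) (out : Int) : Prop := out = count_gaps_alt binary_string
instance (binary_string : String) (out : Int) : Decidable (Spec_count_gaps binary_string out) := by unfold Spec_count_gaps; infer_instance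

-- ===== CLAIM (what is proved, stated in full; the proofs are below) =====
def Claim_equal_count_gaps : Prop := ∀ (binary_string : String), Dom_count_gaps binary_string → Spec_count_gaps binary_string (count_gaps binary_string)

-- ===== LEMMAS AND PROOFS =====

-- max of the inner (non-trailing) zero-runs, the leading run pre-charged with `counter`
def innerMax : List Char → Int → Int
  | [], _ => 0
  | c :: rest, counter =>
    if c = '0' then innerMax rest (counter + 1) else max counter (innerMax rest 0)

theorem innerMax_nonneg : ∀ (l : List Char) (c : Int), 0 ≤ c → 0 ≤ innerMax l c := by
  intro l
  induction l with
  | nil => intro c _; simp [innerMax]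
  | cons x rest ih =>
    intro c hc
    simp only [innerMax]
    split
    · exact ih _ (by omega)
    · exact le_max_of_le_left hc

theorem countGapsLoop_eq_innerMax :
    ∀ (l : List Char) (c h : Int), 0 ≤ c → 0 ≤ h →
      countGapsLoop l c h = max h (innerMax l c) := by
  intro l
  induction l with
  | nil =>
    intro c h _ hh
    simp [countGapsLoop, innerMax, max_eq_left hh]
  | cons x rest ih =>
    intro c h hc hh
    simp only [countGapsLoop, innerMax]
    split
    · exact ih _ _ (by omega) hh
    · rw [ih 0 _ le_rfl (by split_ifs <;> omega)]
      rw [show (if h < c then c else h) = max h c by rw [max_def]; split_ifs <;> omega]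
      rw [max_assoc]

theorem splitNonZero_ne_nil : ∀ (l : List Char), splitNonZero l ≠ [] := by
  intro l
  cases l with
  | nil => simp [splitNonZero]
  | cons c rest =>
    simp only [splitNonZero]
    split
    · cases hr : splitNonZero rest <;> simp
    · simp

-- F parts c : max of the lengths of the non-trailing parts, first part pre-charged with c
def F : List (List Char) → Int → Int
  | [], _ => 0
  | [_], _ => 0
  | p :: q :: ps, c => max (c + p.length) (F (q :: ps) 0)

theorem F_shift : ∀ (ps : List (List Char)) (p : List Char) (c : Char) (a : Int),
    F ((c :: p) :: ps) a = F (p :: ps) (a + 1) := by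
  intro ps p c a
  cases ps with
  | nil => simp [F]
  | cons q qs =>
    simp only [F, List.length_cons]
    push_cast
    ring_nf

theorem innerMax_eq_F : ∀ (l : List Char) (c : Int),
    innerMax l c = F (splitNonZero l) c := by
  intro l
  induction l with
  | nil => intro c; simp [innerMax, splitNonZero, F]
  | cons x rest ih =>
    intro c
    simp only [innerMax, splitNonZero]
    split
    · cases hr : splitNonZero rest with
      | nil => exact absurd hr (splitNonZero_ne_nil rest)
      | cons p ps =>
        rw [F_shift, ← hr, ih]
    · cases hr : splitNonZero rest with
      | nil => exact absurd hr (splitNonZero_ne_nil rest)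
      | cons p ps =>
        simp only [F, List.length_nil]
        rw [← hr, ih 0]
        ring_nf

theorem foldl_max_max : ∀ (l : List Int) (a b : Int),
    List.foldl max (max a b) l = max a (List.foldl max b l) := by
  intro l
  induction l with
  | nil => intro a b; simp
  | cons x xs ih =>
    intro a b
    simp only [List.foldl]
    rw [max_assoc, ih]

theorem foldl_dropLast_eq_F : ∀ (ps : List (List Char)), ps ≠ [] →
    (ps.dropLast.map (fun p => (p.length : Int))).foldl max 0 = F ps 0 := by
  intro ps
  induction ps with
  | nil => intro h; exact absurd rfl h
  | cons p qs ih =>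
    intro _
    cases qs with
    | nil => simp [F]
    | cons q rs =>
      have hne : q :: rs ≠ ([] : List (List Char)) := by simp
      simp only [List.dropLast_cons₂, List.map_cons, List.foldl]
      rw [show max 0 ((p.length : Int)) = max ((p.length : Int)) 0 by rw [max_comm]]
      rw [foldl_max_max, ih hne]
      simp [F]

-- ===== VERDICT (by name: the statement is the Claim_ definition above) =====
theorem count_gaps_spec : Claim_equal_count_gaps := by
  intro s _
  show count_gaps s = count_gaps_alt s
  unfold count_gaps count_gaps_alt
  rw [countGapsLoop_eq_innerMax _ 0 0 le_rfl le_rfl, innerMax_eq_F,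
    foldl_dropLast_eq_F _ (splitNonZero_ne_nil _)]
  simp [max_eq_right (by
    have := innerMax_nonneg s.toList 0 le_rfl
    rw [innerMax_eq_F] at this
    exact this)]
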